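-- pv_equiv track=rewrite | github.com/demonking-mw/catana | src/base_computes/game_state.py | generate_ports
-- ===== SOURCE A (Python) =====
-- from typing import TYPE_CHECKING, List, Dict, Optional, Set, Tuple, Union
--
-- PORT_TILE_TO_NODES: Dict[int, Tuple[str, str]] = {
--     0: ("0_1_5", "0_4_5"),
--     2: ("1_2_6", "2_6_7"),
--     8: ("7_8_13", "8_13_14"),
--     9: ("4_9_10", "9_10_16"),
--     21: ("14_20_21", "20_21_27"),
--     22: ("16_22_23", "22_23_28"),
--     32: ("26_27_32", "26_31_32"),
--     33: ("28_29_33", "29_33_34"),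
--     35: ("30_31_35", "30_34_35"),
-- }
--
-- def generate_ports(tiles: List[List[int]]) -> Dict[str, int]:
--     """Build the ports dict from tile data.
--
--     Scans *tiles* for port entries (NumberToken == -1) and maps each to
--     its two access-node keys using the fixed board topology.
--
--     Args:
--         tiles: List of [ResourceID, NumberToken] indexed by tile ID (0-36).
--
--     Returns:
--         Dict mapping node keys ("T1_T2_T3") to port type
--         (0-4 = 2:1 specific resource, 5 = 3:1 any).
--     """
--     ports: Dict[str, int] = {}
--     for tile_id, (res_id, number_token) in enumerate(tiles):
--         if number_token == -1 and tile_id in PORT_TILE_TO_NODES: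
--             node_a, node_b = PORT_TILE_TO_NODES[tile_id]
--             ports[node_a] = res_id
--             ports[node_b] = res_id
--     return ports
-- ===== SOURCE B (Python) =====
-- PORT_TILE_TO_NODES = {
--     0: ("0_1_5", "0_4_5"),
--     2: ("1_2_6", "2_6_7"),
--     8: ("7_8_13", "8_13_14"),
--     9: ("4_9_10", "9_10_16"),
--     21: ("14_20_21", "20_21_27"),
--     22: ("16_22_23", "22_23_28"),
--     32: ("26_27_32", "26_31_32"),
--     33: ("28_29_33", "29_33_34"),
--     35: ("30_31_35", "30_34_35"),
-- }
--
-- def generate_ports(tiles):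
--     """Table-driven: walk the fixed port table and pull from tiles by index."""
--     ports = {}
--     for tile_id, (node_a, node_b) in PORT_TILE_TO_NODES.items():
--         if tile_id < len(tiles):
--             res_id, number_token = tiles[tile_id]
--             if number_token == -1:
--                 ports[node_a] = res_id
--                 ports[node_b] = res_id
--     return ports
-- ===== Notes on version B (the rewrite author's own statement) =====
-- stated objective: idiomatic
-- what changed: B iterates the fixed PORT_TILE_TO_NODES table and indexes into tiles (guarded by length), instead of enumerating every tile and testing table membership; the scan over all tiles disappears in favour of 9 direct lookups.
import Mathlib
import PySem

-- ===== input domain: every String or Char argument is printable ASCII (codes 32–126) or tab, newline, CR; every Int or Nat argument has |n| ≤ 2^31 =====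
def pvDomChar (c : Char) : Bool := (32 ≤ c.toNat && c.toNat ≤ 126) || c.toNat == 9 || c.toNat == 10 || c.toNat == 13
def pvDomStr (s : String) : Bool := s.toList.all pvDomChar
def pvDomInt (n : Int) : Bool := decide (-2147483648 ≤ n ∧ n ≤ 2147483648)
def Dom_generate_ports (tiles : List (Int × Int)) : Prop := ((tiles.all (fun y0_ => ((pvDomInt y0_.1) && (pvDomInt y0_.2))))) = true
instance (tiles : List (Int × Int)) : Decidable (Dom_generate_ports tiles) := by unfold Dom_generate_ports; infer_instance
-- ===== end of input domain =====

-- B walks the fixed port table and indexes into tiles, instead of scanning every tile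
-- and testing table membership (objective: idiomatic table-driven decomposition).

-- ===== PORT A =====
def portTableList : List (Int × String × String) :=
  [(0, ("0_1_5", "0_4_5")), (2, ("1_2_6", "2_6_7")), (8, ("7_8_13", "8_13_14")),
   (9, ("4_9_10", "9_10_16")), (21, ("14_20_21", "20_21_27")), (22, ("16_22_23", "22_23_28")),
   (32, ("26_27_32", "26_31_32")), (33, ("28_29_33", "29_33_34")), (35, ("30_31_35", "30_34_35"))]

def portTable : PySem.Dict Int (String × String) := PySem.Dict.mk portTableList

def generate_ports (tiles : List (Int × Int)) : List (String × Int) :=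
  ((PySem.List.enumerate tiles 0).foldl
    (fun ports x =>
      if x.2.2 = -1 then
        match portTable.get? x.1 with
        | some nb => (ports.insert nb.1 x.2.1).insert nb.2 x.2.1
        | none => ports
      else ports)
    PySem.Dict.empty).items

-- ===== PORT B =====
def generate_ports_alt (tiles : List (Int × Int)) : List (String × Int) :=
  (portTable.items.foldl
    (fun ports p =>
      match PySem.List.pyGet? tiles p.1 with
      | some t => if t.2 = -1 then (ports.insert p.2.1 t.1).insert p.2.2 t.1 else ports
      | none => ports)
    PySem.Dict.empty).items

-- ===== PRECONDITION & SPEC =====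
def Spec_generate_ports (tiles : List (Int × Int)) (out : List (String × Int)) : Prop := out = generate_ports_alt tiles
instance (tiles : List (Int × Int)) (out : List (String × Int)) : Decidable (Spec_generate_ports tiles out) := by unfold Spec_generate_ports; infer_instance

-- ===== CLAIM (what is proved, stated in full; the proofs are below) =====
def Claim_equal_generate_ports : Prop := ∀ (tiles : List (Int × Int)), Dom_generate_ports tiles → Spec_generate_ports tiles (generate_ports tiles)

-- ===== LEMMAS AND PROOFS =====

-- chunk contributed by A's loop body at index i with tile t, with table ts
def chunkA (ts : List (Int × String × String)) (i : Int) (t : Int × Int) : List (String × Int) :=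
  if t.2 = -1 then
    match (PySem.Dict.mk ts).get? i with
    | some nb => [(nb.1, t.1), (nb.2, t.1)]
    | none => []
  else []

-- chunk contributed by B's loop body at table entry p, with tiles shifted by k
def chunkB (tiles : List (Int × Int)) (k : Int) (p : Int × String × String) : List (String × Int) :=
  match PySem.List.pyGet? tiles (p.1 - k) with
  | some t => if t.2 = -1 then [(p.2.1, t.1), (p.2.2, t.1)] else []
  | none => []

-- a run of inserts with fresh distinct keys appends the pairs to the items list
theorem foldl_insert_chunk (ps : List (String × Int)) (d : PySem.Dict String Int)
    (h : (d.keys ++ ps.map Prod.fst).Nodup) :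
    (ps.foldl (fun d p => d.insert p.1 p.2) d).items = d.items ++ ps := by
  induction ps generalizing d with
  | nil => simp
  | cons p ps ih =>
    have hc : d.contains p.1 = false := by
      rw [PySem.Dict.contains_eq_decide_mem_keys]
      simp only [decide_eq_false_iff_not]
      intro hm
      exact (List.disjoint_of_nodup_append h) hm (by simp)
    rw [List.foldl_cons, ih]
    · rw [PySem.Dict.items_insert_of_not_contains d p.2 hc]; simp
    · rw [PySem.Dict.keys_insert_of_not_contains d p.2 hc]
      have hperm : List.Perm ((d.keys ++ [p.1]) ++ ps.map Prod.fst) (d.keys ++ (p :: ps).map Prod.fst) := by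
        simp only [List.map_cons, List.append_assoc]
        exact List.Perm.refl _
      exact hperm.nodup_iff.mpr h

-- a loop whose body inserts a chunk of fresh distinct keys appends the flatMap
theorem foldl_chunks {α : Type} (l : List α) (f : α → List (String × Int)) (d : PySem.Dict String Int)
    (h : (d.keys ++ (l.flatMap f).map Prod.fst).Nodup) :
    (l.foldl (fun d x => (f x).foldl (fun d p => d.insert p.1 p.2) d) d).items
      = d.items ++ l.flatMap f := by
  induction l generalizing d with
  | nil => simp
  | cons x l ih =>
    simp only [List.flatMap_cons, List.map_append, List.foldl_cons] at h ⊢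
    have hsplit : (d.keys ++ (f x).map Prod.fst).Nodup := by
      refine (List.nodup_append.mpr ?_)
      have h' := List.nodup_append.mp (by simpa [List.append_assoc] using h)
      exact ⟨h'.1, (List.nodup_append.mp h'.2.1).1,
        fun a ha b hb => h'.2.2 a ha b (by simp [hb])⟩
    rw [ih]
    · rw [foldl_insert_chunk (f x) d hsplit, List.append_assoc]
    · have hk2 : ((f x).foldl (fun d p => d.insert p.1 p.2) d).keys
          = d.keys ++ (f x).map Prod.fst := by
        simp only [PySem.Dict.keys, foldl_insert_chunk (f x) d hsplit, List.map_append]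
      rw [hk2]
      simpa [List.append_assoc] using h

theorem flatMap_sublist {α β : Type} (l : List α) (f g : α → List β)
    (h : ∀ x ∈ l, (f x).Sublist (g x)) : (l.flatMap f).Sublist (l.flatMap g) := by
  induction l with
  | nil => simp
  | cons x l ih =>
    simp only [List.flatMap_cons]
    exact (h x (by simp)).append (ih (fun y hy => h y (by simp [hy])))

theorem pyGet?_cons_of_pos (x : Int × Int) (xs : List (Int × Int)) (m : Int) (hm : 0 ≤ m) :
    PySem.List.pyGet? (x :: xs) (m + 1) = PySem.List.pyGet? xs m := by
  rw [PySem.List.pyGet?_of_nonneg (x :: xs) (by omega : (0:Int) ≤ m + 1),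
      PySem.List.pyGet?_of_nonneg xs hm]
  have h : (m + 1).toNat = m.toNat + 1 := by omega
  rw [h, List.getElem?_cons_succ]

theorem chunkB_shift (t : Int × Int) (rest : List (Int × Int)) (k : Int)
    (q : Int × String × String) (hq : k + 1 ≤ q.1) :
    chunkB (t :: rest) k q = chunkB rest (k + 1) q := by
  unfold chunkB
  have h : q.1 - k = (q.1 - (k + 1)) + 1 := by omega
  rw [h, pyGet?_cons_of_pos t rest _ (by omega)]

theorem get?_mk_none (ts : List (Int × String × String)) (i : Int)
    (h : ∀ q ∈ ts, i < q.1) : (PySem.Dict.mk ts).get? i = none := by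
  rw [PySem.Dict.get?_eq_none_iff_not_mem_keys]
  intro hmem
  simp only [PySem.Dict.keys, List.mem_map] at hmem
  obtain ⟨q, hq, rfl⟩ := hmem
  exact absurd (h q hq) (by omega)

theorem chunkA_nil (i : Int) (t : Int × Int) : chunkA [] i t = [] := by
  unfold chunkA
  rw [get?_mk_none [] i (by simp)]
  split <;> rfl

-- the two flatMap forms coincide: A scans tiles in index order, B scans the sorted table
theorem core (tiles : List (Int × Int)) :
    ∀ (ts : List (Int × String × String)) (k : Int),
    ts.Pairwise (fun p q => p.1 < q.1) → (∀ p ∈ ts, k ≤ p.1) →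
    (PySem.List.enumerate tiles k).flatMap (fun x => chunkA ts x.1 x.2)
      = ts.flatMap (fun p => chunkB tiles k p) := by
  induction tiles with
  | nil =>
    intro ts k _ _
    rw [PySem.List.enumerate_nil, List.flatMap_nil]
    symm
    rw [List.flatMap_eq_nil_iff]
    intro p _
    unfold chunkB
    rw [show PySem.List.pyGet? ([] : List (Int × Int)) (p.1 - k) = none by
      simp [PySem.List.pyGet?, PySem.List.pyIdx?]]
  | cons t rest ih =>
    intro ts k hsort hk
    rw [PySem.List.enumerate_cons, List.flatMap_cons]
    match ts with
    | [] =>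
      simp only [List.flatMap_nil, chunkA_nil, List.nil_append]
      rw [List.flatMap_eq_nil_iff]
      intro x _
      rfl
    | p :: ts' =>
      have hk' : ∀ q ∈ ts', k + 1 ≤ q.1 := by
        intro q hq
        have h1 := hk p (by simp)
        have h2 := (List.pairwise_cons.mp hsort).1 q hq
        omega
      have hsort' := (List.pairwise_cons.mp hsort).2
      by_cases hp : p.1 = k
      · -- the head table entry fires exactly at index k
        have hhead : chunkA (p :: ts') k t = chunkB (t :: rest) k p := by
          unfold chunkA chunkB
          rw [hp]
          simp only [sub_self]
          rw [PySem.Dict.get?_mk_cons, if_pos (show (p.1 == k) = true by simp [hp]),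
              PySem.List.pyGet?_zero_cons]
        have htl : (PySem.List.enumerate rest (k+1)).flatMap (fun x => chunkA (p :: ts') x.1 x.2)
            = ts'.flatMap (fun q => chunkB rest (k+1) q) := by
          rw [show (PySem.List.enumerate rest (k+1)).flatMap (fun x => chunkA (p :: ts') x.1 x.2)
              = (PySem.List.enumerate rest (k+1)).flatMap (fun x => chunkA ts' x.1 x.2) from ?_,
              ih ts' (k+1) hsort' hk']
          apply List.flatMap_congr
          intro x hx
          obtain ⟨j, hj, rfl⟩ := (PySem.List.mem_enumerate_iff rest (k+1) x).mp hx
          unfold chunkA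
          rw [PySem.Dict.get?_mk_cons,
              if_neg (show ¬((p.1 == k + 1 + (j : Int)) = true) by simp; omega)]
        rw [hhead, htl, List.flatMap_cons]
        congr 1
        apply List.flatMap_congr
        intro q hq
        exact (chunkB_shift t rest k q (hk' q hq)).symm
      · -- no table entry at index k: A's head step is a no-op
        have hall : ∀ q ∈ p :: ts', k + 1 ≤ q.1 := by
          intro q hq
          rcases List.mem_cons.mp hq with rfl | hq'
          · have := hk q (by simp); omega
          · exact hk' q hq'
        have hh : chunkA (p :: ts') k t = [] := by
          unfold chunkA
          rw [get?_mk_none _ k (by intro q hq; have := hall q hq; omega)]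
          split <;> rfl
        rw [hh, List.nil_append, ih (p :: ts') (k+1) hsort hall]
        apply List.flatMap_congr
        intro q hq
        exact (chunkB_shift t rest k q (hall q hq)).symm

-- B only ever inserts the 18 pairwise-distinct node keys of the table, in table order
theorem keysB_nodup (tiles : List (Int × Int)) :
    ((portTableList.flatMap (fun p => chunkB tiles 0 p)).map Prod.fst).Nodup := by
  have hsub : ((portTableList.flatMap (fun p => chunkB tiles 0 p)).map Prod.fst).Sublist
      (portTableList.flatMap (fun p => [p.2.1, p.2.2])) := by
    rw [List.map_flatMap]
    apply flatMap_sublist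
    intro p _
    unfold chunkB
    cases PySem.List.pyGet? tiles (p.1 - 0) with
    | none => simp
    | some t =>
      by_cases h : t.2 = -1
      · simp [h]
      · simp [h]
  exact hsub.nodup (by decide)

theorem ports_eq (tiles : List (Int × Int)) : generate_ports tiles = generate_ports_alt tiles := by
  have hcore := core tiles portTableList 0 (by decide) (by decide)
  have hBnodup := keysB_nodup tiles
  have hAnodup : (((PySem.List.enumerate tiles 0).flatMap
      (fun x => chunkA portTableList x.1 x.2)).map Prod.fst).Nodup := by
    rw [hcore]; exact hBnodup
  have hA : generate_ports tiles
      = (PySem.List.enumerate tiles 0).flatMap (fun x => chunkA portTableList x.1 x.2) := by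
    unfold generate_ports
    have hstep : (fun (ports : PySem.Dict String Int) (x : Int × Int × Int) =>
        if x.2.2 = -1 then
          match portTable.get? x.1 with
          | some nb => (ports.insert nb.1 x.2.1).insert nb.2 x.2.1
          | none => ports
        else ports)
        = fun ports x => (chunkA portTableList x.1 x.2).foldl (fun d p => d.insert p.1 p.2) ports := by
      funext ports x
      unfold chunkA portTable
      by_cases ht : x.2.2 = -1
      · simp only [if_pos ht]
        cases (PySem.Dict.mk portTableList).get? x.1 <;> simp
      · simp [if_neg ht]
    rw [hstep, foldl_chunks _ _ _ (by simpa using hAnodup)]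
    rfl
  have hB : generate_ports_alt tiles
      = portTableList.flatMap (fun p => chunkB tiles 0 p) := by
    unfold generate_ports_alt
    have hstep : (fun (ports : PySem.Dict String Int) (p : Int × String × String) =>
        match PySem.List.pyGet? tiles p.1 with
        | some t => if t.2 = -1 then (ports.insert p.2.1 t.1).insert p.2.2 t.1 else ports
        | none => ports)
        = fun ports p => (chunkB tiles 0 p).foldl (fun d p => d.insert p.1 p.2) ports := by
      funext ports p
      unfold chunkB
      rw [show p.1 - 0 = p.1 from sub_zero p.1]
      cases h : PySem.List.pyGet? tiles p.1 with
      | none => simp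
      | some t => by_cases ht : t.2 = -1 <;> simp [ht]
    rw [show portTable.items = portTableList from rfl, hstep,
        foldl_chunks _ _ _ (by simpa using hBnodup)]
    rfl
  rw [hA, hB, hcore]

-- ===== VERDICT (by name: the statement is the Claim_ definition above) =====
theorem generate_ports_spec : Claim_equal_generate_ports := by
  intro tiles _
  unfold Spec_generate_ports
  exact ports_eq tiles
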